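-- pv_equiv track=rewrite | github.com/cuadchris/code_wars | python/mobile_display_keystrokes.py | mobile_keyboard
-- ===== SOURCE A (Python) =====
-- def mobile_keyboard(s):
--
--     dict = {
--         "1": 1, "2": 1, "3": 1, "4": 1, "5": 1, "6": 1, "7": 1, "8": 1, "9": 1, "0": 1,
--         "*": 1, "#": 1, "a": 2, "b": 3, "c": 4, "d": 2, "e": 3, "f": 4, "g": 2, "h": 3,
--         "i": 4, "j": 2, "k": 3, "l": 4, "m": 2, "n": 3, "o": 4, "p": 2, "q": 3, "r": 4,
--         "s": 5, "t": 2, "u": 3, "v": 4, "w": 2, "x": 3, "y": 4, "z": 5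
--     }
--
--     return sum(dict[x] for x in s)
-- ===== SOURCE B (Python) =====
-- # Staged counting: total = length + one extra press per tier membership,
-- # instead of a per-character cost table.
-- TIERS = ("abcdefghijklmnopqrstuvwxyz", "bcefhiklnoqrsuvxyz", "cfilorsvyz", "sz")
--
--
-- def mobile_keyboard(s):
--     total = len(s)
--     for tier in TIERS:
--         for x in s:
--             if x in tier:
--                 total += 1
--     return total
-- ===== Notes on version B (the rewrite author's own statement) =====
-- stated objective: alternative
-- what changed: Replaces the per-character 38-entry cost-dict lookup sum by staged counting: the total is the string length plus one extra keypress for each of four nested membership tiers (letters, second-or-later in group, third-or-later, fourth), so no per-character cost table or lookup exists at all.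
import Mathlib
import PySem

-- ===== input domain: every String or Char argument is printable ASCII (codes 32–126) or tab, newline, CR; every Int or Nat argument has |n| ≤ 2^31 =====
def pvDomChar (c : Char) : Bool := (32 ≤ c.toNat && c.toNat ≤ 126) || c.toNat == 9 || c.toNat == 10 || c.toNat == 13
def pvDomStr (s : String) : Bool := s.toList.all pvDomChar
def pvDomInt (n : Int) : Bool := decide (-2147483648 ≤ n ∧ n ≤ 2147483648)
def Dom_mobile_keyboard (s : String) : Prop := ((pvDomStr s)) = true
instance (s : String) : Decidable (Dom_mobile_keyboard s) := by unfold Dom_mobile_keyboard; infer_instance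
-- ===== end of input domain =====

-- B drops A's per-character cost dict and instead counts in stages: length plus one
-- extra press per membership in four nested tiers (alternative decomposition, same cost).

-- ===== PORT A =====
-- A's literal dict (single-character keys, insertion order as in the source).
def pvADict : PySem.Dict Char Int := PySem.Dict.ofList
  [('1', 1), ('2', 1), ('3', 1), ('4', 1), ('5', 1), ('6', 1), ('7', 1), ('8', 1), ('9', 1), ('0', 1),
   ('*', 1), ('#', 1), ('a', 2), ('b', 3), ('c', 4), ('d', 2), ('e', 3), ('f', 4), ('g', 2), ('h', 3),
   ('i', 4), ('j', 2), ('k', 3), ('l', 4), ('m', 2), ('n', 3), ('o', 4), ('p', 2), ('q', 3), ('r', 4),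
   ('s', 5), ('t', 2), ('u', 3), ('v', 4), ('w', 2), ('x', 3), ('y', 4), ('z', 5)]

-- sum(dict[x] for x in s); dict[x] raises KeyError on a missing key (get? = none),
-- excluded by Pre_ — the getD default 0 is never used inside Pre_.
def mobile_keyboard (s : String) : Int :=
  (s.toList.map (fun x => (pvADict.get? x).getD 0)).sum

-- ===== PORT B =====
def pvTiers : List (List Char) :=
  [['a','b','c','d','e','f','g','h','i','j','k','l','m','n','o','p','q','r','s','t','u','v','w','x','y','z'],
   ['b','c','e','f','h','i','k','l','n','o','q','r','s','u','v','x','y','z'],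
   ['c','f','i','l','o','r','s','v','y','z'],
   ['s','z']]

-- total = len(s); for tier in TIERS: for x in s: if x in tier: total += 1
def mobile_keyboard_alt (s : String) : Int :=
  pvTiers.foldl
    (fun total tier =>
      s.toList.foldl (fun t x => if PySem.Chars.isIn [x] tier then t + 1 else t) total)
    (s.toList.length : Int)

-- ===== PRECONDITION & SPEC =====
-- Pre_ excludes exactly the strings containing a character outside A's dict
-- (uppercase, space, other punctuation), on which A raises KeyError.
def pvAllowed : List Char :=
  ['0','1','2','3','4','5','6','7','8','9','*','#',
   'a','b','c','d','e','f','g','h','i','j','k','l','m',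
   'n','o','p','q','r','s','t','u','v','w','x','y','z']

def Pre_mobile_keyboard (s : String) : Prop :=
  s.toList.all (fun c => pvAllowed.contains c) = true
instance (s : String) : Decidable (Pre_mobile_keyboard s) := by
  unfold Pre_mobile_keyboard; infer_instance

def pvWitness_mobile_keyboard : String := "1"

def Spec_mobile_keyboard (s : String) (out : Int) : Prop := out = mobile_keyboard_alt s
instance (s : String) (out : Int) : Decidable (Spec_mobile_keyboard s out) := by
  unfold Spec_mobile_keyboard; infer_instance

-- ===== CLAIM (what is proved, stated in full; the proofs are below) =====
def Claim_equal_mobile_keyboard : Prop :=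
  ∀ (s : String), Dom_mobile_keyboard s → Pre_mobile_keyboard s →
    Spec_mobile_keyboard s (mobile_keyboard s)

-- ===== LEMMAS AND PROOFS =====

-- per-character agreement: A's dict cost = 1 + one per tier containing the character
set_option maxRecDepth 100000 in
theorem pvChar_eq (c : Char) (h : c ∈ pvAllowed) :
    ((pvADict.get? c).getD 0 : Int)
      = 1 + (pvTiers.map (fun tier => if PySem.Chars.isIn [c] tier then (1 : Int) else 0)).sum := by
  have hall : pvAllowed.all (fun c =>
      ((pvADict.get? c).getD 0 : Int)
        == 1 + (pvTiers.map (fun tier => if PySem.Chars.isIn [c] tier then (1 : Int) else 0)).sum) = true := by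
    decide
  exact eq_of_beq (List.all_eq_true.mp hall c h)

-- B's nested fold as length + per-tier countP sums
theorem pvAlt_eq (s : String) :
    mobile_keyboard_alt s
      = (s.toList.length : Int)
        + (pvTiers.map (fun tier =>
            (s.toList.countP (fun x => PySem.Chars.isIn [x] tier) : Int))).sum := by
  unfold mobile_keyboard_alt
  simp only [pvTiers, List.foldl_cons, List.foldl_nil, PySem.List.foldl_if_add_one,
    List.map_cons, List.map_nil, List.sum_cons, List.sum_nil]
  ring

theorem pvMain (l : List Char) (h : ∀ c ∈ l, c ∈ pvAllowed) :
    (l.map (fun x => (pvADict.get? x).getD 0)).sum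
      = (l.length : Int)
        + (pvTiers.map (fun tier => (l.countP (fun x => PySem.Chars.isIn [x] tier) : Int))).sum := by
  induction l with
  | nil => simp [pvTiers]
  | cons c rest ih =>
    have hc := pvChar_eq c (h c (List.mem_cons_self))
    have ihr := ih (fun x hx => h x (List.mem_cons_of_mem _ hx))
    simp only [List.map_cons, List.sum_cons, List.length_cons, List.countP_cons] at *
    rw [hc, ihr]
    simp only [pvTiers, List.map_cons, List.map_nil, List.sum_cons, List.sum_nil]
    split_ifs <;> push_cast <;> ring

-- ===== VERDICT (by name: the statement is the Claim_ definition above) =====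
theorem mobile_keyboard_spec : Claim_equal_mobile_keyboard := by
  intro s _ hpre
  unfold Spec_mobile_keyboard mobile_keyboard
  rw [pvAlt_eq]
  refine pvMain s.toList (fun c hc => ?_)
  have := List.all_eq_true.mp hpre c hc
  simpa using this
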